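-- pv_equiv track=rewrite | github.com/tapiatellez/Comprehensibility | Comprensibilidad.py | get_related_concepts
-- ===== SOURCE A (Python) =====
-- def get_related_concepts(concepts, paragraphs_occurrences):
--     related_concepts_dictionary = {}
--     for concept in concepts:
--         related_concept_list = []
--         for related_concept in concepts:
--             if concept != related_concept:
--                 counter = 0
--                 for paragrah, occurrences in paragraphs_occurrences.items():
--                     if concept in occurrences and related_concept in occurrences:
--                         counter += 1
--                 if counter > 0:
--                     related_concept_list.append(related_concept)
--         related_concepts_dictionary[concept] = related_concept_list
--     return related_concepts_dictionary
-- ===== SOURCE B (Python) =====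
-- def get_related_concepts(concepts, paragraphs_occurrences):
--     cset = set(concepts)
--     adj = {c: set() for c in cset}
--     for occurrences in paragraphs_occurrences.values():
--         present = cset.intersection(occurrences)
--         for c in present:
--             adj[c].update(present)
--     return {c: [rc for rc in concepts if rc != c and rc in adj[c]]
--             for c in concepts}
-- ===== Notes on version B (the rewrite author's own statement) =====
-- stated objective: faster
-- what changed: Instead of scanning all paragraphs once per concept pair (O(C^2*P) membership scans), B makes one pass over the paragraphs building per-concept co-occurrence adjacency sets (hash sets), then emits each concept's related list by filtering the concepts list against its adjacency set.
import Mathlib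
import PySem

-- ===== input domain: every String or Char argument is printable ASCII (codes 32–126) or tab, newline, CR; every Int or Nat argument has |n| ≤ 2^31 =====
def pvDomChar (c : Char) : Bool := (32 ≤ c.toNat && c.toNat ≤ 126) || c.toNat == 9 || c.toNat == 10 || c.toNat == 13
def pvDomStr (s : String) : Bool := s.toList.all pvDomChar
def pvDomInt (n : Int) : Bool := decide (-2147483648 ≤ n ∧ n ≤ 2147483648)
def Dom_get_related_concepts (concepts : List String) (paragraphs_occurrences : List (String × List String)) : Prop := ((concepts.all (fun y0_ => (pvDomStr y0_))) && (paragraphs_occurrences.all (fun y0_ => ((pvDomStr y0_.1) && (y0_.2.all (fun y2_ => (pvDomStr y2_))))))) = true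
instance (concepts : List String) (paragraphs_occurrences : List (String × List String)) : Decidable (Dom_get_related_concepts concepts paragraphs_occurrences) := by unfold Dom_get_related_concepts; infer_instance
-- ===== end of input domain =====

-- B replaces A's per-pair scan of all paragraphs by one pass over the paragraphs building
-- co-occurrence adjacency sets, then emits the lists in concepts order (objective: faster, asymptotic).

-- ===== PORT A =====
def get_related_concepts (concepts : List String) (paragraphs_occurrences : List (String × List String)) : List (String × List String) :=
  (concepts.foldl (fun (d : PySem.Dict String (List String)) concept =>
    let related_concept_list := concepts.foldl (fun lst related_concept =>
      if concept ≠ related_concept then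
        let counter : Int := paragraphs_occurrences.foldl (fun c po =>
          if concept ∈ po.2 ∧ related_concept ∈ po.2 then c + 1 else c) 0
        if counter > 0 then lst ++ [related_concept] else lst
      else lst) []
    d.insert concept related_concept_list) PySem.Dict.empty).items

-- ===== PORT B =====
def get_related_concepts_alt (concepts : List String) (paragraphs_occurrences : List (String × List String)) : List (String × List String) :=
  let cset : PySem.Set String := PySem.Set.ofList concepts
  -- adj = {c: set() for c in cset}
  let adj0 : PySem.Dict String (PySem.Set String) :=
    cset.foldl (fun d c => d.insert c PySem.Set.empty) PySem.Dict.empty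
  -- for occurrences in paragraphs_occurrences.values(): present = cset & occurrences; for c in present: adj[c].update(present)
  let adj : PySem.Dict String (PySem.Set String) :=
    paragraphs_occurrences.foldl (fun d po =>
      let present := PySem.Set.inter cset po.2
      present.foldl (fun d c => d.modify c PySem.Set.empty (fun s => PySem.Set.update s present)) d) adj0
  -- {c: [rc for rc in concepts if rc != c and rc in adj[c]] for c in concepts}
  (concepts.foldl (fun (d : PySem.Dict String (List String)) c =>
    d.insert c (concepts.filter (fun rc => rc != c && PySem.Set.contains (adj.getD c PySem.Set.empty) rc))) PySem.Dict.empty).items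

-- ===== PRECONDITION & SPEC =====
def Spec_get_related_concepts (concepts : List String) (paragraphs_occurrences : List (String × List String)) (out : List (String × List String)) : Prop := out = get_related_concepts_alt concepts paragraphs_occurrences
instance (concepts : List String) (paragraphs_occurrences : List (String × List String)) (out : List (String × List String)) : Decidable (Spec_get_related_concepts concepts paragraphs_occurrences out) := by unfold Spec_get_related_concepts; infer_instance

-- ===== CLAIM (what is proved, stated in full; the proofs are below) =====
def Claim_equal_get_related_concepts : Prop := ∀ (concepts : List String) (paragraphs_occurrences : List (String × List String)), Dom_get_related_concepts concepts paragraphs_occurrences → Spec_get_related_concepts concepts paragraphs_occurrences (get_related_concepts concepts paragraphs_occurrences)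

-- ===== LEMMAS AND PROOFS =====

-- membership in adj[c] after the inner 'for c in present' fold of B
theorem mem_getD_inner (l present : List String) (d : PySem.Dict String (PySem.Set String)) (c rc : String) :
    (rc ∈ (l.foldl (fun d c => d.modify c PySem.Set.empty (fun s => PySem.Set.update s present)) d).getD c PySem.Set.empty
      ↔ rc ∈ d.getD c PySem.Set.empty ∨ (c ∈ l ∧ rc ∈ present)) := by
  induction l generalizing d with
  | nil => simp
  | cons k l ih =>
    simp only [List.foldl_cons, ih, PySem.Dict.getD_modify, List.mem_cons]
    by_cases hck : c = k
    · subst hck; simp [PySem.Set.mem_update]; tauto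
    · simp [hck]

-- membership in adj[c] after B's paragraph fold
theorem mem_getD_adj (paras : List (String × List String)) (cset : List String)
    (d : PySem.Dict String (PySem.Set String)) (c rc : String) :
    (rc ∈ (paras.foldl (fun d po =>
        let present := PySem.Set.inter cset po.2
        present.foldl (fun d c => d.modify c PySem.Set.empty (fun s => PySem.Set.update s present)) d) d).getD c PySem.Set.empty
      ↔ rc ∈ d.getD c PySem.Set.empty ∨ ∃ po ∈ paras, (c ∈ cset ∧ c ∈ po.2) ∧ (rc ∈ cset ∧ rc ∈ po.2)) := by
  induction paras generalizing d with
  | nil => simp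
  | cons po ps ih =>
    simp only [List.foldl_cons, ih, mem_getD_inner, PySem.Set.mem_inter, List.mem_cons]
    constructor
    · rintro ((h | ⟨h1, h2⟩) | ⟨p, hp, hh⟩)
      · exact Or.inl h
      · exact Or.inr ⟨po, Or.inl rfl, h1, h2⟩
      · exact Or.inr ⟨p, Or.inr hp, hh⟩
    · rintro (h | ⟨p, (rfl | hp), hh⟩)
      · exact Or.inl (Or.inl h)
      · exact Or.inl (Or.inr hh)
      · exact Or.inr ⟨p, hp, hh⟩

-- B's initial dict {c: set() for c in cset} has empty values everywhere
theorem getD_adj0 (cset : List String) (c rc : String) :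
    rc ∉ (cset.foldl (fun d c => d.insert c PySem.Set.empty) (PySem.Dict.empty : PySem.Dict String (PySem.Set String))).getD c PySem.Set.empty := by
  have step : ∀ (d : PySem.Dict String (PySem.Set String)),
      (∀ x, rc ∉ d.getD x PySem.Set.empty) →
      rc ∉ (cset.foldl (fun d c => d.insert c PySem.Set.empty) d).getD c PySem.Set.empty := by
    induction cset with
    | nil => intro d h; exact h c
    | cons k l ih =>
      intro d h
      refine ih _ (fun x => ?_)
      rw [PySem.Dict.getD_insert]
      split
      · simp [PySem.Set.empty]
      · exact h x
  exact step _ (fun x => by simp [PySem.Dict.getD_empty, PySem.Set.empty])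

-- A's counter is positive iff some paragraph contains both concepts
theorem counter_pos (paras : List (String × List String)) (c rc : String) :
    ((0 : Int) < paras.foldl (fun n po => if c ∈ po.2 ∧ rc ∈ po.2 then n + 1 else n) 0
      ↔ ∃ po ∈ paras, c ∈ po.2 ∧ rc ∈ po.2) := by
  rw [PySem.List.foldl_ite_add_one]
  simp only [zero_add, Int.natCast_pos, List.countP_pos_iff, decide_eq_true_eq]

-- ===== VERDICT (by name: the statement is the Claim_ definition above) =====
theorem get_related_concepts_spec : Claim_equal_get_related_concepts := by
  intro concepts paras _
  unfold Spec_get_related_concepts get_related_concepts get_related_concepts_alt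
  refine congrArg _ ?_
  apply PySem.List.foldl_congr_mem
  intro d c hc
  refine congrArg (d.insert c) ?_
  have hstep : (fun (lst : List String) related_concept =>
      if c ≠ related_concept then
        let counter : Int := paras.foldl (fun n po => if c ∈ po.2 ∧ related_concept ∈ po.2 then n + 1 else n) 0
        if counter > 0 then lst ++ [related_concept] else lst
      else lst)
    = fun lst rc => if (c ≠ rc ∧ (0:Int) < paras.foldl (fun n po => if c ∈ po.2 ∧ rc ∈ po.2 then n + 1 else n) 0) then lst ++ [rc] else lst := by
    funext lst rc
    by_cases h1 : c ≠ rc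
    · by_cases h2 : (0:Int) < paras.foldl (fun n po => if c ∈ po.2 ∧ rc ∈ po.2 then n + 1 else n) 0 <;>
        simp [h1, h2]
    · simp [h1]
  rw [hstep, PySem.List.foldl_append_ite_eq_filter]
  simp only [List.nil_append]
  refine List.filter_congr ?_
  intro rc hrc
  rw [Bool.eq_iff_iff]
  simp only [decide_eq_true_eq, Bool.and_eq_true, bne_iff_ne, PySem.Set.contains_iff]
  rw [counter_pos, mem_getD_adj]
  simp only [getD_adj0, false_or, PySem.Set.mem_ofList, hc, hrc, true_and]
  constructor
  · rintro ⟨h1, h2⟩; exact ⟨Ne.symm h1, h2⟩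
  · rintro ⟨h1, h2⟩; exact ⟨Ne.symm h1, h2⟩
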